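-- pv_equiv track=rewrite | github.com/MarzioVallero/Advanced-Soft-Upset-Quantum-Analyzer | injector.py | merge_injection_paths
-- ===== SOURCE A (Python) =====
-- def check_if_sublist(source, sublist):
--     """Recursively checks if <sublist> is contained in <source>."""
--     if len(sublist) == 0:
--         return True
--     if len(source) == 0:
--         return False
--     if source[0] == sublist[0]:
--         return check_if_sublist(source[1:], sublist[1:])
--     else:
--         return check_if_sublist(source[1:], sublist)
--
-- def merge_injection_paths(error_spread_map0, error_spread_map1):
--     """Merges two <error_spread_map> lists of paths by keeping the shortest common subpaths among all paths.
--     Works correctly only if the supplied error_spread_maps refer to adjacent nodes."""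
--     merge = []
--     for source_path in error_spread_map0:
--         merge.append(source_path)
--         for subpath in error_spread_map1:
--             if subpath not in merge:
--                 if check_if_sublist(source_path, subpath):
--                     merge.append(subpath)
--                     if len(source_path) > 2:
--                         merge.remove(source_path)
--                 if len(subpath) == 1:
--                     merge.append(subpath)
--     return merge
-- ===== SOURCE B (Python) =====
-- def is_subsequence(sublist, source):
--     """Iterative two-pointer subsequence scan (no recursion, no slice copies)."""
--     i = 0
--     n = len(sublist)
--     for s in source:
--         if i < n and s == sublist[i]:
--             i += 1
--     return i == n
--
--
-- def merge_injection_paths(error_spread_map0, error_spread_map1):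
--     merge = []
--     for source_path in error_spread_map0:
--         merge.append(source_path)
--         for subpath in error_spread_map1:
--             if subpath in merge:
--                 continue
--             matched = is_subsequence(subpath, source_path)
--             if matched:
--                 merge.append(subpath)
--                 if len(source_path) > 2:
--                     merge.remove(source_path)
--             if len(subpath) == 1:
--                 merge.append(subpath)
--     return merge
-- ===== Notes on version B (the rewrite author's own statement) =====
-- stated objective: faster
-- what changed: The recursive helper check_if_sublist (which copies a slice of source at every recursion step) is replaced by an iterative single-pass two-pointer subsequence scan, and the inner merge-loop body is reorganized around a guard and a hoisted match flag; the merge state machine (append/remove/ValueError behaviour) is preserved exactly.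
import Mathlib
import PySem

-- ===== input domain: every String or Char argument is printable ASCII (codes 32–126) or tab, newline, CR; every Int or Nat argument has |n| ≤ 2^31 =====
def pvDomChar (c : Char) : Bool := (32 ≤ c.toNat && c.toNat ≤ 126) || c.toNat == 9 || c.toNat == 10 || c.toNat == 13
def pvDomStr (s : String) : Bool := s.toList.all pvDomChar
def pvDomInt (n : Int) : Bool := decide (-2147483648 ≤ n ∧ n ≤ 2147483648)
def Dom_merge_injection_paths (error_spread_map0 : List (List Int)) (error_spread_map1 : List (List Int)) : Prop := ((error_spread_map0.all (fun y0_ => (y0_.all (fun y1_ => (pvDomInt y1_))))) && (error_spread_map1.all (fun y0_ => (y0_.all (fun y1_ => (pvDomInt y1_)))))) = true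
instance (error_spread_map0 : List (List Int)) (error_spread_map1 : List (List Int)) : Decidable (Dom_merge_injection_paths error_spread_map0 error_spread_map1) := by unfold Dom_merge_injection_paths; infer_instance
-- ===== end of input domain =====

-- B replaces the recursive check_if_sublist helper (which slices source at every step) with an
-- iterative two-pointer subsequence scan and streamlines the inner-loop body (guard + hoisted
-- match flag); the merge loop's state machine is kept, so B returns (and raises) exactly as A.

-- ===== PORT A =====
-- recursion exactly as Python's check_if_sublist (sublist-empty, source-empty, head compare)
def check_if_sublist : List Int → List Int → Bool
  | _, [] => true
  | [], _ :: _ => false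
  | s :: src, t :: sub =>
    if s = t then check_if_sublist src sub else check_if_sublist src (t :: sub)

-- inner-loop body of A; state none = a ValueError was raised by merge.remove
def mergeStepA (source_path : List Int) (m : Option (List (List Int))) (subpath : List Int) :
    Option (List (List Int)) :=
  match m with
  | none => none
  | some merge =>
    if merge.contains subpath then some merge
    else
      let m1 : Option (List (List Int)) :=
        if check_if_sublist source_path subpath then
          let m2 := merge ++ [subpath]
          if 2 < source_path.length then PySem.List.remove? m2 source_path else some m2
        else some merge
      if subpath.length = 1 then m1.map (· ++ [subpath]) else m1

-- on inputs excluded by Pre_ the Python raises ValueError; there the port returns [] (getD)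
def merge_injection_paths (error_spread_map0 : List (List Int))
    (error_spread_map1 : List (List Int)) : List (List Int) :=
  (error_spread_map0.foldl
    (fun m source_path =>
      error_spread_map1.foldl (mergeStepA source_path) (m.map (· ++ [source_path])))
    (some [])).getD []

-- ===== PORT B =====
-- iterative two-pointer scan from Source B: one pass over source, index i into sublist
def is_subsequence (sublist source : List Int) : Bool :=
  (source.foldl
    (fun i s => if i < sublist.length ∧ sublist[i]? = some s then i + 1 else i) 0)
    == sublist.length

def mergeStepB (source_path : List Int) (m : Option (List (List Int))) (subpath : List Int) :
    Option (List (List Int)) :=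
  m.bind (fun merge =>
    if merge.contains subpath then some merge   -- continue
    else
      let matched := is_subsequence subpath source_path
      let afterMatch : Option (List (List Int)) :=
        if matched then
          if 2 < source_path.length then PySem.List.remove? (merge ++ [subpath]) source_path
          else some (merge ++ [subpath])
        else some merge
      afterMatch.map (fun l => if subpath.length = 1 then l ++ [subpath] else l))

def merge_injection_paths_alt (error_spread_map0 : List (List Int))
    (error_spread_map1 : List (List Int)) : List (List Int) :=
  (error_spread_map0.foldl
    (fun m source_path =>
      error_spread_map1.foldl (mergeStepB source_path) (m.map (· ++ [source_path])))
    (some [])).getD []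

-- ===== PRECONDITION & SPEC =====
-- helpers for Pre_ (independent of both ports): subsequence relation and bounded counts over the input
def pvSubOf (t s : List Int) : Bool := decide (t.Sublist s)

-- overapproximate count of "fresh" matching distinct subpaths at outer iteration j (used only to
-- certify that the long source m0[j] survives its own iteration untouched)
def pvCntW (m1 : List (List Int)) (s : List Int) (j : Nat) : Nat :=
  (m1.dedup).countP (fun t => t != s && pvSubOf t s && !(t.length == 1 && j != 0))

-- t is certainly already in the merge list when outer iteration k starts
def pvBlocked (m0 m1 : List (List Int)) (k : Nat) (t : List Int) : Bool :=
  let before := m0.take k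
  (t.length == 1 && k != 0)
  || (before.any (fun p => pvSubOf t p) && !(before.any (fun p => p == t && decide (2 < p.length))))
  || before.any (fun p => p == t && decide (p.length ≤ 2))
  || (List.range k).any (fun j =>
        m0.getD j [] == t && pvCntW m1 (m0.getD j []) j == 0
          && ((before.drop (j+1)).all (fun p => p != t)))

-- for every long source path, at most one distinct not-yet-merged subpath of it in m1
def pvNoCrashA (m0 m1 : List (List Int)) : Bool :=
  (List.range m0.length).all (fun k =>
    let s := m0.getD k []
    !(decide (2 < s.length))
      || decide (((m1.dedup).countP
            (fun t => t != s && pvSubOf t s && !pvBlocked m0 m1 k t)) ≤ 1))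

-- Pre_ excludes exactly the inputs on which A's merge.remove raises ValueError (Python B keeps the
-- same merge machinery and raises the same ValueError there): a crash happens iff some long source
-- path still meets two distinct subpaths of it that are not yet in the merge list.
def Pre_merge_injection_paths (error_spread_map0 : List (List Int))
    (error_spread_map1 : List (List Int)) : Prop :=
  pvNoCrashA error_spread_map0 error_spread_map1 = true

instance (error_spread_map0 : List (List Int)) (error_spread_map1 : List (List Int)) :
    Decidable (Pre_merge_injection_paths error_spread_map0 error_spread_map1) := by
  unfold Pre_merge_injection_paths; infer_instance

def pvWitness_merge_injection_paths : List (List Int) × List (List Int) :=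
  ([[1, 2, 3]], [[1, 2]])

def Spec_merge_injection_paths (error_spread_map0 : List (List Int)) (error_spread_map1 : List (List Int)) (out : List (List Int)) : Prop := out = merge_injection_paths_alt error_spread_map0 error_spread_map1
instance (error_spread_map0 : List (List Int)) (error_spread_map1 : List (List Int)) (out : List (List Int)) : Decidable (Spec_merge_injection_paths error_spread_map0 error_spread_map1 out) := by unfold Spec_merge_injection_paths; infer_instance

-- ===== CLAIM (what is proved, stated in full; the proofs are below) =====
def Claim_equal_merge_injection_paths : Prop := ∀ (error_spread_map0 : List (List Int)) (error_spread_map1 : List (List Int)), Dom_merge_injection_paths error_spread_map0 error_spread_map1 → Pre_merge_injection_paths error_spread_map0 error_spread_map1 → Spec_merge_injection_paths error_spread_map0 error_spread_map1 (merge_injection_paths error_spread_map0 error_spread_map1)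

-- ===== LEMMAS AND PROOFS =====

-- once the two-pointer index reaches the end of sublist it never moves
lemma foldl_idx_fixed (sub : List Int) (source : List Int) (i : Nat) (h : sub.length ≤ i) :
    source.foldl
      (fun i s => if i < sub.length ∧ sub[i]? = some s then i + 1 else i) i = i := by
  induction source with
  | nil => rfl
  | cons s rest ih =>
    simp only [List.foldl_cons]
    rw [if_neg (by omega), ih]

-- the two-pointer scan started at i computes A's recursive check on (sub.drop i)
lemma foldl_idx_check (source : List Int) (sub : List Int) (i : Nat) (h : i ≤ sub.length) :
    ((source.foldl
        (fun i s => if i < sub.length ∧ sub[i]? = some s then i + 1 else i) i)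
      == sub.length) = check_if_sublist source (sub.drop i) := by
  induction source generalizing i with
  | nil =>
    rcases Nat.lt_or_ge i sub.length with hlt | hge
    · rw [List.drop_eq_getElem_cons hlt]
      simp only [List.foldl_nil, check_if_sublist]
      simp [Nat.ne_of_lt hlt]
    · have : i = sub.length := Nat.le_antisymm h hge
      subst this
      simp [check_if_sublist, List.drop_length]
  | cons s rest ih =>
    rcases Nat.lt_or_ge i sub.length with hlt | hge
    · rw [List.drop_eq_getElem_cons hlt]
      simp only [List.foldl_cons, check_if_sublist]
      by_cases heq : s = sub[i]
      · rw [if_pos ⟨hlt, by simp [heq]⟩, if_pos heq, ih (i + 1) hlt]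
      · rw [if_neg (by simp [List.getElem?_eq_getElem hlt]; intro _ hc; exact heq hc.symm), if_neg heq, ih i h,
          List.drop_eq_getElem_cons hlt]
    · have : i = sub.length := Nat.le_antisymm h hge
      subst this
      rw [foldl_idx_fixed _ _ _ (Nat.le_refl _)]
      simp [check_if_sublist, List.drop_length]

-- B's iterative helper equals A's recursive helper
lemma is_subsequence_eq (sub source : List Int) :
    is_subsequence sub source = check_if_sublist source sub := by
  unfold is_subsequence
  simpa using foldl_idx_check source sub 0 (Nat.zero_le _)

-- the two inner-loop bodies are the same state transformer
lemma mergeStep_eq (source_path : List Int) (m : Option (List (List Int)))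
    (subpath : List Int) :
    mergeStepB source_path m subpath = mergeStepA source_path m subpath := by
  cases m with
  | none => rfl
  | some merge =>
    simp only [mergeStepB, mergeStepA, Option.bind_some, is_subsequence_eq]
    by_cases hc : merge.contains subpath
    · rw [if_pos hc, if_pos hc]
    · rw [if_neg hc, if_neg hc]
      by_cases h1 : subpath.length = 1 <;>
        by_cases hs : check_if_sublist source_path subpath <;>
          by_cases hl : 2 < source_path.length <;>
            simp [h1, hs, hl, Option.map_id']

theorem merge_injection_paths_eq_alt (m0 m1 : List (List Int)) :
    merge_injection_paths m0 m1 = merge_injection_paths_alt m0 m1 := by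
  unfold merge_injection_paths merge_injection_paths_alt
  have h : mergeStepB = mergeStepA := by
    funext a b c; exact mergeStep_eq a b c
  rw [h]

-- ===== VERDICT (by name: the statement is the Claim_ definition above) =====
theorem merge_injection_paths_spec : Claim_equal_merge_injection_paths := by
  intro m0 m1 _ _
  unfold Spec_merge_injection_paths
  exact merge_injection_paths_eq_alt m0 m1
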